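-- pv_equiv track=rewrite | github.com/gniadoo/Domino_Game | main.py | counting_numbers_rarity
-- ===== SOURCE A (Python) =====
-- def counting_numbers_rarity(main_snake, computer_hand):
--     number_values = []
--     for n in range(7):
--         count = 0
--         for i in main_snake + computer_hand:
--             if n in i:
--                 count += 1
--         number_values.append(count)
--     return number_values
-- ===== SOURCE B (Python) =====
-- def counting_numbers_rarity(main_snake, computer_hand):
--     tally = [0] * 7
--     for tile in main_snake + computer_hand:
--         for x in set(tile):
--             if 0 <= x <= 6:
--                 tally[x] += 1
--     return tally
-- ===== Notes on version B (the rewrite author's own statement) =====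
-- stated objective: alternative
-- what changed: Replaces the 7 per-number scans over all tiles with a single pass that fills a 7-slot tally table, deduplicating each tile with set() so a tile counts once per number it contains.
import Mathlib
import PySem

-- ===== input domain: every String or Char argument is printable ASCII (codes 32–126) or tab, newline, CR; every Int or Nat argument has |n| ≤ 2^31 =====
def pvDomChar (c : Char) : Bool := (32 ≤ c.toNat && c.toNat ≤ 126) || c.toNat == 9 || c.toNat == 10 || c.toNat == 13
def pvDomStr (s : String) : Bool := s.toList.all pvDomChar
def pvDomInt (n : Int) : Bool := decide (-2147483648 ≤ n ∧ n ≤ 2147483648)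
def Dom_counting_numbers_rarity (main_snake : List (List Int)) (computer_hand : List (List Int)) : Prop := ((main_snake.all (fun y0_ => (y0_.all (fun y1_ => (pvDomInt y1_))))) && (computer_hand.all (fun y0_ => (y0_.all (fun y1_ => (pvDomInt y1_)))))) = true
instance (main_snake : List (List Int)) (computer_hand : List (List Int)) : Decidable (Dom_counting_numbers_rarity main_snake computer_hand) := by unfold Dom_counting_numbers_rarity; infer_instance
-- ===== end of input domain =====

-- B replaces A's 7 per-number scans over all tiles by one pass filling a 7-slot tally table (dedup per tile via set): a single traversal instead of seven.


-- ===== PORT A =====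
def counting_numbers_rarity (main_snake : List (List Int)) (computer_hand : List (List Int)) : List Int :=
  (PySem.List.pyRange 0 7 1).foldl
    (fun number_values n =>
      number_values ++
        [(main_snake ++ computer_hand).foldl (fun count i => if n ∈ i then count + 1 else count) 0])
    []

-- ===== PORT B =====
-- one set-element step of Source B's inner loop: if 0 <= x <= 6: tally[x] += 1
def pvBump (tally : List Int) (x : Int) : List Int :=
  if 0 ≤ x ∧ x ≤ 6 then
    PySem.List.pySetD tally x (PySem.List.pyGetD tally x 0 + 1)
  else tally

def counting_numbers_rarity_alt (main_snake : List (List Int)) (computer_hand : List (List Int)) : List Int :=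
  (main_snake ++ computer_hand).foldl
    (fun tally tile => (PySem.Set.ofList tile).foldl pvBump tally)
    (List.replicate 7 0)

-- ===== PRECONDITION & SPEC =====
def Spec_counting_numbers_rarity (main_snake : List (List Int)) (computer_hand : List (List Int)) (out : List Int) : Prop := out = counting_numbers_rarity_alt main_snake computer_hand
instance (main_snake : List (List Int)) (computer_hand : List (List Int)) (out : List Int) : Decidable (Spec_counting_numbers_rarity main_snake computer_hand out) := by unfold Spec_counting_numbers_rarity; infer_instance

-- ===== CLAIM (what is proved, stated in full; the proofs are below) =====
def Claim_equal_counting_numbers_rarity : Prop := ∀ (main_snake : List (List Int)) (computer_hand : List (List Int)), Dom_counting_numbers_rarity main_snake computer_hand → Spec_counting_numbers_rarity main_snake computer_hand (counting_numbers_rarity main_snake computer_hand)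

-- ===== LEMMAS AND PROOFS =====

theorem pvBump_length (t : List Int) (x : Int) : (pvBump t x).length = t.length := by
  unfold pvBump; split <;> simp [PySem.List.length_pySetD]

theorem pvBump_getD (t : List Int) (x : Int) (k : Nat) (ht : t.length = 7) (hk : k < 7) :
    PySem.List.pyGetD (pvBump t x) (k : Int) 0 =
      PySem.List.pyGetD t (k : Int) 0 + (if x = (k : Int) then 1 else 0) := by
  unfold pvBump
  split
  · next h =>
    obtain ⟨h0, h6⟩ := h
    obtain ⟨n, hn⟩ := Int.eq_ofNat_of_zero_le h0
    rw [hn, PySem.List.pyGetD_pySetD_natCast t n k _ 0 (by omega)]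
    by_cases hnk : k = n
    · rw [← hnk]
      simp
    · rw [if_neg hnk, if_neg (by exact_mod_cast fun h : (n:Int) = (k:Int) => hnk (Nat.cast_injective h).symm)]
      ring
  · next h =>
    have : ¬ x = (k : Int) := by omega
    rw [if_neg this]
    ring

theorem foldl_pvBump_length (S : List Int) (t : List Int) :
    (S.foldl pvBump t).length = t.length := by
  induction S generalizing t with
  | nil => rfl
  | cons a S ih => simp [List.foldl_cons, ih, pvBump_length]

theorem foldl_pvBump_getD (S : List Int) (t : List Int) (k : Nat)
    (ht : t.length = 7) (hk : k < 7) (hnd : S.Nodup) :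
    PySem.List.pyGetD (S.foldl pvBump t) (k : Int) 0 =
      PySem.List.pyGetD t (k : Int) 0 + (if (k : Int) ∈ S then 1 else 0) := by
  induction S generalizing t with
  | nil => simp
  | cons a S ih =>
    have hnd' := List.nodup_cons.mp hnd
    rw [List.foldl_cons, ih (pvBump t a) ((pvBump_length t a).trans ht) hnd'.2,
        pvBump_getD t a k ht hk]
    simp only [List.mem_cons]
    generalize PySem.List.pyGetD t (k : Int) 0 = c
    by_cases hak : a = (k : Int)
    · have hkS : (k : Int) ∉ S := hak ▸ hnd'.1
      rw [if_pos hak, if_neg hkS, if_pos (Or.inl hak.symm)]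
      ring
    · rw [if_neg hak]
      by_cases hmem : (k : Int) ∈ S
      · rw [if_pos hmem, if_pos (Or.inr hmem)]
        ring
      · rw [if_neg hmem, if_neg (by rintro (h | h); exacts [hak h.symm, hmem h])]
        ring

theorem tiles_fold_length (tiles : List (List Int)) (t : List Int) :
    (tiles.foldl (fun tally tile => (PySem.Set.ofList tile).foldl pvBump tally) t).length = t.length := by
  induction tiles generalizing t with
  | nil => rfl
  | cons a tiles ih => simp [List.foldl_cons, ih, foldl_pvBump_length]

theorem tiles_fold_getD (tiles : List (List Int)) (t : List Int) (k : Nat)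
    (ht : t.length = 7) (hk : k < 7) :
    PySem.List.pyGetD (tiles.foldl (fun tally tile => (PySem.Set.ofList tile).foldl pvBump tally) t) (k : Int) 0 =
      PySem.List.pyGetD t (k : Int) 0 + (tiles.countP (fun i => decide ((k : Int) ∈ i)) : Int) := by
  induction tiles generalizing t with
  | nil => simp
  | cons a tiles ih =>
    rw [List.foldl_cons, ih _ ((foldl_pvBump_length _ t).trans ht),
        foldl_pvBump_getD (PySem.Set.ofList a) t k ht hk (PySem.Set.nodup_ofList a),
        List.countP_cons]
    simp only [PySem.Set.mem_ofList, decide_eq_true_eq]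
    generalize PySem.List.pyGetD t (k : Int) 0 = c
    split_ifs <;> push_cast <;> ring

-- A's fold builds [f 0, f 1, …, f 6] for f n = count of tiles containing n
theorem portA_eq_map (main_snake computer_hand : List (List Int)) :
    counting_numbers_rarity main_snake computer_hand =
      ([0, 1, 2, 3, 4, 5, 6] : List Int).map
        (fun n => ((main_snake ++ computer_hand).countP (fun i => decide (n ∈ i)) : Int)) := by
  unfold counting_numbers_rarity
  have hr : PySem.List.pyRange 0 7 1 = ([0, 1, 2, 3, 4, 5, 6] : List Int) := by decide
  rw [hr, PySem.List.foldl_append_singleton_eq_map, List.nil_append]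
  refine List.map_congr_left (fun n _ => ?_)
  have hfun : ∀ (c : Int) (i : List Int),
      (if n ∈ i then c + 1 else c) = (if (fun i => decide (n ∈ i)) i = true then c + 1 else c) := by
    intro c i; simp
  simp only [hfun]
  rw [PySem.List.foldl_count_if (fun i => decide (n ∈ i)) (main_snake ++ computer_hand) 0]
  simp

-- ===== VERDICT (by name: the statement is the Claim_ definition above) =====
theorem counting_numbers_rarity_spec : Claim_equal_counting_numbers_rarity := by
  intro main_snake computer_hand _
  unfold Spec_counting_numbers_rarity
  rw [portA_eq_map]
  apply List.ext_getElem
  · simp [counting_numbers_rarity_alt, tiles_fold_length]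
  · intro k h1 h2
    have hk : k < 7 := by simpa using h1
    have hB := tiles_fold_getD (main_snake ++ computer_hand) (List.replicate 7 0) k (by simp) hk
    rw [PySem.List.pyGetD_natCast, PySem.List.pyGetD_natCast] at hB
    have hget : (counting_numbers_rarity_alt main_snake computer_hand).getD k 0 =
        (counting_numbers_rarity_alt main_snake computer_hand)[k] :=
      List.getD_eq_getElem _ _ h2
    rw [← hget, counting_numbers_rarity_alt, hB]
    interval_cases k <;> simp
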